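-- pv_equiv track=rewrite | github.com/michaelrbock/leet-code | python/valid-sudoku.py | valid_section
-- ===== SOURCE A (Python) =====
-- def valid_section(section):
--   nums = set()
--   for cell in section:
--     if cell == '.':
--       continue
--     if cell in nums:
--       return False
--     nums.add(cell)
--   return True
-- ===== SOURCE B (Python) =====
-- def valid_section(section):
--   cells = sorted(c for c in section if c != '.')
--   return all(a != b for a, b in zip(cells, cells[1:]))
-- ===== Notes on version B (the rewrite author's own statement) =====
-- stated objective: alternative
-- what changed: B sorts the non-placeholder cells and detects duplicates by scanning adjacent pairs of the sorted list, instead of A's one-pass running set with membership tests and early return.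
import Mathlib
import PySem

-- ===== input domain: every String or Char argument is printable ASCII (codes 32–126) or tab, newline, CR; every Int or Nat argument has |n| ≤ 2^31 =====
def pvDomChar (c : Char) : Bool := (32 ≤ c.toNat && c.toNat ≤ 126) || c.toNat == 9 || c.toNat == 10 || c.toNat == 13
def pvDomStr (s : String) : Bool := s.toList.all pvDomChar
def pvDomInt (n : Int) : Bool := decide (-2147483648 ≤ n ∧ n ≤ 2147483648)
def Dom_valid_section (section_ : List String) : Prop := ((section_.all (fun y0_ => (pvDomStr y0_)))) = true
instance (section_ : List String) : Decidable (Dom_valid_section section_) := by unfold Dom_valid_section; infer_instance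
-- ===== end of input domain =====

-- B sorts the non-placeholder cells and checks that no two adjacent entries of the sorted list are
-- equal, instead of A's one-pass running set with membership tests and early return (alternative).

-- ===== PORT A =====
-- the loop of A: running set `nums`, early return False on a repeated non-'.' cell
def validSectionLoop (cells : List String) (nums : PySem.Set String) : Bool :=
  match cells with
  | [] => true
  | cell :: rest =>
    if cell = "." then validSectionLoop rest nums
    else if PySem.Set.contains nums cell then false
    else validSectionLoop rest (PySem.Set.add nums cell)

def valid_section (section_ : List String) : Bool :=
  validSectionLoop section_ PySem.Set.empty

-- ===== PORT B =====
-- cells[1:] of Source B is `cells.tail`; zip + all over adjacent pairs, exact on lists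
def valid_section_alt (section_ : List String) : Bool :=
  let cells := PySem.List.sorted (section_.filter (fun c => c ≠ ".")) (fun x => x) false
  (cells.zip cells.tail).all (fun p => p.1 != p.2)

-- ===== PRECONDITION & SPEC =====
def Spec_valid_section (section_ : List String) (out : Bool) : Prop := out = valid_section_alt section_
instance (section_ : List String) (out : Bool) : Decidable (Spec_valid_section section_ out) := by unfold Spec_valid_section; infer_instance

-- ===== CLAIM (what is proved, stated in full; the proofs are below) =====
def Claim_equal_valid_section : Prop := ∀ (section_ : List String), Dom_valid_section section_ → Spec_valid_section section_ (valid_section section_)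

-- ===== LEMMAS AND PROOFS =====

theorem set_add_mem (s : PySem.Set String) (x y : String) :
    y ∈ PySem.Set.add s x ↔ y = x ∨ y ∈ s := by
  simp [PySem.Set.add, PySem.Set.contains]
  by_cases h : x ∈ s <;> simp [h]
  · rintro rfl; exact h
  · tauto

-- A's loop returns true iff the non-'.' cells are pairwise distinct and fresh w.r.t. `nums`
theorem validSectionLoop_iff (cells : List String) (nums : PySem.Set String) :
    validSectionLoop cells nums = true ↔
      ((cells.filter (fun c => c ≠ ".")).Nodup ∧
        ∀ x ∈ cells.filter (fun c => c ≠ "."), x ∉ nums) := by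
  induction cells generalizing nums with
  | nil => simp [validSectionLoop]
  | cons cell rest ih =>
    by_cases hdot : cell = "."
    · simp [validSectionLoop, hdot, ih]
    · by_cases hmem : cell ∈ nums
      · simp [validSectionLoop, hdot, PySem.Set.contains, hmem]
      · simp only [validSectionLoop, if_neg hdot, PySem.Set.contains]
        rw [if_neg (by simpa using hmem)]
        rw [ih]
        simp only [List.filter_cons, ne_eq, hdot, not_false_iff, decide_true, if_true,
          List.nodup_cons, List.mem_cons]
        constructor
        · rintro ⟨hnd, hall⟩
          refine ⟨⟨fun hc => ?_, hnd⟩, ?_⟩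
          · exact (hall cell hc) ((set_add_mem nums cell cell).mpr (Or.inl rfl))
          · rintro x (rfl | hx)
            · exact hmem
            · intro hxn
              exact hall x hx ((set_add_mem nums cell x).mpr (Or.inr hxn))
        · rintro ⟨⟨hcn, hnd⟩, hall⟩
          refine ⟨hnd, ?_⟩
          intro x hx hxadd
          rcases (set_add_mem nums cell x).mp hxadd with rfl | hxn
          · exact hcn hx
          · exact hall x (Or.inr hx) hxn

-- the adjacent-pairs scan of B is exactly IsChain (· ≠ ·)
theorem allZipNe_iff (l : List String) :
    ((l.zip l.tail).all (fun p => p.1 != p.2)) = true ↔ l.IsChain (· ≠ ·) := by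
  induction l with
  | nil => simp
  | cons a t ih =>
    cases t with
    | nil => simp
    | cons b t' =>
      simp only [List.tail_cons, List.zip_cons_cons, List.all_cons, List.isChain_cons_cons,
        Bool.and_eq_true, bne_iff_ne, ne_eq] at *
      rw [ih]

-- on a ≤-sorted list, adjacent distinctness is exactly Nodup
theorem chain_ne_iff_nodup (l : List String) (hs : l.Pairwise (· ≤ ·)) :
    l.IsChain (· ≠ ·) ↔ l.Nodup := by
  induction l with
  | nil => simp
  | cons a t ih =>
    rcases List.pairwise_cons.mp hs with ⟨hat, hts⟩
    cases t with
    | nil => simp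
    | cons b t' =>
      rw [List.isChain_cons_cons, List.nodup_cons, ih hts]
      constructor
      · rintro ⟨hab, hnd⟩
        refine ⟨?_, hnd⟩
        intro hmem
        have halt : a < b := lt_of_le_of_ne (hat b (by simp)) hab
        rcases List.mem_cons.mp hmem with rfl | hmt'
        · exact hab rfl
        · have hba : b ≤ a := (List.pairwise_cons.mp hts).1 a hmt'
          exact absurd (lt_of_lt_of_le halt hba) (lt_irrefl a)
      · rintro ⟨hnm, hnd⟩
        exact ⟨fun h => hnm (h ▸ List.mem_cons_self), hnd⟩

theorem valid_section_spec : Claim_equal_valid_section := by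
  intro section_ _
  unfold Spec_valid_section valid_section valid_section_alt
  set f := section_.filter (fun c => c ≠ ".") with hf
  set s := PySem.List.sorted f (fun x => x) false with hs
  rw [Bool.eq_iff_iff, validSectionLoop_iff, allZipNe_iff,
    chain_ne_iff_nodup s (by simpa using PySem.List.sorted_pairwise f (fun x => x)),
    (PySem.List.sorted_perm f (fun x => x) false).nodup_iff]
  constructor
  · rintro ⟨hnd, _⟩; exact hnd
  · intro hnd
    exact ⟨hnd, fun x _ hx => by simp [PySem.Set.empty] at hx⟩
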